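-- pv_equiv track=rewrite | github.com/sakamo-wni/MobileCommentGenerator | src/utils/weather_classifier.py | is_weather_stable
-- ===== SOURCE A (Python) =====
-- from typing import List, Literal
--
-- WeatherType = Literal["sunny", "cloudy", "rainy", "snowy", "other"]
--
-- WEATHER_CHANGE_THRESHOLD = 2  # 「変わりやすい」と判定する変化回数の閾値
--
-- def count_weather_type_changes(weather_sequence: List[WeatherType]) -> int:
--     """
--     天気タイプの変化回数をカウントする
--
--     Args:
--         weather_sequence: 天気タイプのリスト
--
--     Returns:
--         変化回数
--     """
--     if len(weather_sequence) <= 1: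
--         return 0
--
--     changes = 0
--     for i in range(1, len(weather_sequence)):
--         if weather_sequence[i] != weather_sequence[i-1]:
--             changes += 1
--
--     return changes
--
-- def is_weather_stable(weather_sequence: List[WeatherType], allow_morning_difference: bool = True) -> bool:
--     """
--     天気が安定しているかを判定する
--
--     Args:
--         weather_sequence: 天気タイプのリスト
--         allow_morning_difference: 朝だけ違う場合を安定とみなすか
--
--     Returns:
--         安定している場合True
--     """
--     if not weather_sequence:
--         return False
--
--     changes = count_weather_type_changes(weather_sequence)
--
--     # 変化が閾値以上なら不安定
--     if changes >= WEATHER_CHANGE_THRESHOLD: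
--         return False
--
--     # 朝だけ違う場合の特別処理
--     if allow_morning_difference and changes == 1 and len(weather_sequence) >= 4:
--         # インデックス1以降が全て同じかチェック
--         if all(weather_sequence[i] == weather_sequence[1] for i in range(1, len(weather_sequence))):
--             return True
--
--     # その他の場合は変化が1回以下なら安定
--     return changes <= 1
-- ===== SOURCE B (Python) =====
-- def is_weather_stable(weather_sequence, allow_morning_difference=True):
--     if not weather_sequence:
--         return False
--     c = weather_sequence.count(weather_sequence[0])
--     return weather_sequence == [weather_sequence[0]] * c + [weather_sequence[-1]] * (len(weather_sequence) - c)
-- ===== Notes on version B (the rewrite author's own statement) =====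
-- stated objective: alternative
-- what changed: B does not count transitions at all: it reconstructs the canonical two-block sequence (first element repeated count(first) times, then last element filling the rest) and returns whether the input equals that reconstruction; A's redundant morning-difference branch never changes the result and is dropped.
import Mathlib
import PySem

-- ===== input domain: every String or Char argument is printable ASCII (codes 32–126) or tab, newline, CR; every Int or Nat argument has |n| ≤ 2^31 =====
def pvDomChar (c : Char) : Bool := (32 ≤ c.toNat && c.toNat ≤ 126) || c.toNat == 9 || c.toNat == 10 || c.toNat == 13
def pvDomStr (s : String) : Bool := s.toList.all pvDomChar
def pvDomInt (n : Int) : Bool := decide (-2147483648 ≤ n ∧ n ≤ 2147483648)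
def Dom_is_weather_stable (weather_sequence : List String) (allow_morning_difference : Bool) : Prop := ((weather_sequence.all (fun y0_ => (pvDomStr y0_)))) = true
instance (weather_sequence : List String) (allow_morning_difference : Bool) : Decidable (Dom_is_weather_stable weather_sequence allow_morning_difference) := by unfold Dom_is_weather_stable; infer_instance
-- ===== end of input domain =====

-- B checks stability by comparing the input to its reconstructed canonical two-block form
-- (first element repeated count(first) times, then the last element) instead of counting
-- transitions; A's redundant morning-difference branch is dropped. Objective: alternative, same O(n).

-- ===== PORT A =====
-- indices produced by pyRange 1 len are always in range, so pyGetD with a dummy default is exact here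
def count_weather_type_changes (weather_sequence : List String) : Int :=
  if weather_sequence.length ≤ 1 then 0
  else
    (PySem.List.pyRange 1 (weather_sequence.length : Int) 1).foldl
      (fun changes i =>
        if PySem.List.pyGetD weather_sequence i "" ≠ PySem.List.pyGetD weather_sequence (i - 1) ""
        then changes + 1 else changes) 0

def is_weather_stable (weather_sequence : List String) (allow_morning_difference : Bool) : Bool :=
  if weather_sequence = [] then false
  else
    let changes := count_weather_type_changes weather_sequence
    if changes ≥ 2 then false
    else if allow_morning_difference && changes == 1 && weather_sequence.length ≥ 4 &&
        ((PySem.List.pyRange 1 (weather_sequence.length : Int) 1).all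
          (fun i => PySem.List.pyGetD weather_sequence i "" == PySem.List.pyGetD weather_sequence 1 ""))
    then true
    else decide (changes ≤ 1)

-- ===== PORT B =====
-- seq[0] / seq[-1] are in range because the list is nonempty; list * int is List.replicate
def is_weather_stable_alt (weather_sequence : List String) (allow_morning_difference : Bool) : Bool :=
  if weather_sequence = [] then false
  else
    let first := PySem.List.pyGetD weather_sequence 0 ""
    let last := PySem.List.pyGetD weather_sequence (-1) ""
    let c := PySem.List.count weather_sequence first
    decide (weather_sequence =
      List.replicate c first ++ List.replicate (weather_sequence.length - c) last)

-- ===== PRECONDITION & SPEC =====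
def Spec_is_weather_stable (weather_sequence : List String) (allow_morning_difference : Bool) (out : Bool) : Prop := out = is_weather_stable_alt weather_sequence allow_morning_difference
instance (weather_sequence : List String) (allow_morning_difference : Bool) (out : Bool) : Decidable (Spec_is_weather_stable weather_sequence allow_morning_difference out) := by unfold Spec_is_weather_stable; infer_instance

-- ===== CLAIM =====
def Claim_equal_is_weather_stable : Prop := ∀ (weather_sequence : List String) (allow_morning_difference : Bool), Dom_is_weather_stable weather_sequence allow_morning_difference → Spec_is_weather_stable weather_sequence allow_morning_difference (is_weather_stable weather_sequence allow_morning_difference)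

-- ===== LEMMAS AND PROOFS =====

-- run count: the number of maximal constant blocks (proof-only helper)
def pvRunCount : List String → Int
  | [] => 0
  | [_] => 1
  | a :: b :: t => (if a = b then 0 else 1) + pvRunCount (b :: t)

theorem pvRunCount_pos (ws : List String) (h : ws ≠ []) : 1 ≤ pvRunCount ws := by
  induction ws with
  | nil => simp at h
  | cons a t ih =>
    cases t with
    | nil => simp [pvRunCount]
    | cons b u =>
      have := ih (by simp)
      simp only [pvRunCount]
      split <;> omega

theorem pv_foldl_changes (ws : List String) (j : Nat) (c : Int) (hj : j < ws.length) :
    (PySem.List.pyRange ((j : Int) + 1) (ws.length : Int) 1).foldl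
      (fun changes i =>
        if PySem.List.pyGetD ws i "" ≠ PySem.List.pyGetD ws (i - 1) ""
        then changes + 1 else changes) c
    = c + pvRunCount (ws.drop j) - 1 := by
  induction hn : ws.length - j generalizing j c with
  | zero => omega
  | succ n ih =>
    by_cases hlt : j + 1 < ws.length
    · have hcons : PySem.List.pyRange ((j : Int) + 1) (ws.length : Int) 1
          = ((j : Int) + 1) :: PySem.List.pyRange ((j : Int) + 1 + 1) (ws.length : Int) 1 :=
        PySem.List.pyRange_one_cons (by exact_mod_cast hlt)
      rw [hcons]
      simp only [List.foldl_cons]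
      have hg1 : PySem.List.pyGetD ws ((j : Int) + 1) "" = ws[j + 1] := by
        have := PySem.List.pyGetD_natCast ws (j + 1) ""
        rw [List.getD_eq_getElem _ _ hlt] at this
        simpa using this
      have hg0 : PySem.List.pyGetD ws ((j : Int) + 1 - 1) "" = ws[j] := by
        have h1 : ((j : Int) + 1 - 1) = ((j : Nat) : Int) := by omega
        rw [h1]
        have := PySem.List.pyGetD_natCast ws j ""
        rw [List.getD_eq_getElem _ _ hj] at this
        exact this
      have hdrop : ws.drop j = ws[j] :: ws.drop (j + 1) := List.drop_eq_getElem_cons hj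
      have hdrop1 : ws.drop (j + 1) = ws[j + 1] :: ws.drop (j + 2) := List.drop_eq_getElem_cons hlt
      have hcast : ((j : Int) + 1) = (((j + 1 : Nat)) : Int) := by push_cast; ring
      rw [hg1, hg0, hcast, ih (j + 1) _ hlt (by omega)]
      rw [hdrop, hdrop1]
      simp only [pvRunCount]
      by_cases he : ws[j] = ws[j + 1] <;> simp [he, eq_comm] <;> omega
    · have hj1 : j + 1 = ws.length := by omega
      have hempty : PySem.List.pyRange ((j : Int) + 1) (ws.length : Int) 1 = [] := by
        rw [PySem.List.pyRange_one]
        have : ((ws.length : Int) - ((j : Int) + 1)).toNat = 0 := by omega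
        simp [this]
      have hdrop : ws.drop j = [ws[j]] := by
        rw [List.drop_eq_getElem_cons hj, hj1, List.drop_length]
      rw [hempty, hdrop]
      simp [pvRunCount]

theorem pv_changes_eq (ws : List String) (h : ws ≠ []) :
    count_weather_type_changes ws = pvRunCount ws - 1 := by
  unfold count_weather_type_changes
  by_cases hlen : ws.length ≤ 1
  · match ws, h with
    | [a], _ => simp [pvRunCount]
    | a :: b :: t, _ => simp at hlen
  · have h0 : 0 < ws.length := by omega
    simp only [hlen, if_false]
    have := pv_foldl_changes ws 0 0 h0
    simpa using this

-- a list with a single run is constant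
theorem pvRunCount_const (x : String) (t : List String) (h : pvRunCount (x :: t) ≤ 1) :
    x :: t = List.replicate (t.length + 1) x := by
  induction t generalizing x with
  | nil => simp
  | cons b u ih =>
    have hp := pvRunCount_pos (b :: u) (by simp)
    simp only [pvRunCount] at h
    have hxb : x = b := by by_contra hne; simp [hne] at h; omega
    subst hxb
    have hle : pvRunCount (x :: u) ≤ 1 := by simp at h; omega
    rw [List.replicate_succ]
    exact congrArg (x :: ·) (ih x hle)

theorem pvRunCount_shape (ws : List String) (hne : ws ≠ []) (h2 : pvRunCount ws ≤ 2) :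
    ∃ a b x y, 0 < a ∧ ws = List.replicate a x ++ List.replicate b y ∧ (b = 0 ∨ x ≠ y) := by
  induction ws with
  | nil => simp at hne
  | cons x t ih =>
    cases t with
    | nil => exact ⟨1, 0, x, x, by omega, by simp, Or.inl rfl⟩
    | cons b u =>
      simp only [pvRunCount] at h2
      by_cases hxb : x = b
      · subst hxb
        have hle : pvRunCount (x :: u) ≤ 2 := by simp at h2; omega
        obtain ⟨a, b', x', y, ha, heq, hor⟩ := ih (by simp) hle
        have hx' : x = x' := by
          obtain ⟨a'', rfl⟩ : ∃ a'', a = a'' + 1 := ⟨a - 1, by omega⟩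
          rw [List.replicate_succ] at heq
          exact (List.cons_eq_cons.mp heq).1
        subst hx'
        refine ⟨a + 1, b', x, y, by omega, ?_, hor⟩
        rw [List.replicate_succ, List.cons_append, ← heq]
      · have hle : pvRunCount (b :: u) ≤ 1 := by simp [hxb] at h2; omega
        refine ⟨1, u.length + 1, x, b, by omega, ?_, Or.inr hxb⟩
        rw [pvRunCount_const b u hle]
        simp

theorem pvRunCount_cons_le (a : String) (m : List String) :
    pvRunCount (a :: m) ≤ 1 + pvRunCount m := by
  cases m with
  | nil => simp [pvRunCount]
  | cons b t => simp only [pvRunCount]; split <;> omega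

theorem pvRunCount_append (l m : List String) :
    pvRunCount (l ++ m) ≤ pvRunCount l + pvRunCount m := by
  induction l with
  | nil => simp [pvRunCount]
  | cons a l ih =>
    cases l with
    | nil => simpa [pvRunCount] using pvRunCount_cons_le a m
    | cons b t =>
      simp only [List.cons_append, pvRunCount]
      have := ih
      simp only [List.cons_append] at this
      split <;> omega

theorem pvRunCount_replicate (n : Nat) (x : String) :
    pvRunCount (List.replicate n x) ≤ 1 := by
  induction n with
  | zero => simp [pvRunCount]
  | succ n ih =>
    cases n with
    | zero => simp [pvRunCount]
    | succ m =>
      rw [List.replicate_succ, List.replicate_succ]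
      simpa [pvRunCount, ← List.replicate_succ] using ih

-- the core characterisation: at most two runs ↔ the canonical two-block reconstruction is exact
theorem pvRunCount_iff_recon (ws : List String) (hne : ws ≠ []) :
    pvRunCount ws ≤ 2 ↔
    ws = List.replicate (PySem.List.count ws (PySem.List.pyGetD ws 0 ""))
          (PySem.List.pyGetD ws 0 "")
        ++ List.replicate (ws.length - PySem.List.count ws (PySem.List.pyGetD ws 0 ""))
          (PySem.List.pyGetD ws (-1) "") := by
  constructor
  · intro h2
    obtain ⟨a, b, x, y, ha, heq, hor⟩ := pvRunCount_shape ws hne h2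
    obtain ⟨a', rfl⟩ : ∃ a', a = a' + 1 := ⟨a - 1, by omega⟩
    have hfirst : PySem.List.pyGetD ws 0 "" = x := by
      rw [heq, List.replicate_succ]
      simp [PySem.List.pyGetD_zero_cons]
    by_cases hb : b = 0
    · subst hb
      simp only [List.replicate_zero, List.append_nil] at heq
      have hcount : PySem.List.count ws x = a' + 1 := by
        rw [PySem.List.count_eq, heq, List.count_replicate_self]
      have hlen : ws.length = a' + 1 := by rw [heq]; simp
      rw [hfirst, hcount, hlen, Nat.sub_self]
      simpa using heq
    · have hxy : x ≠ y := hor.resolve_left hb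
      obtain ⟨b', rfl⟩ : ∃ b', b = b' + 1 := ⟨b - 1, by omega⟩
      have hcount : PySem.List.count ws x = a' + 1 := by
        rw [PySem.List.count_eq, heq, List.count_append, List.count_replicate_self,
          List.count_replicate]
        simp [Ne.symm hxy]
      have hlast : PySem.List.pyGetD ws (-1) "" = y := by
        rw [PySem.List.pyGetD_neg_one ws "" hne, List.getLast_eq_iff_getLast?_eq_some, heq,
          List.getLast?_append]
        simp [List.replicate_succ']
      have hlen : ws.length = (a' + 1) + (b' + 1) := by rw [heq]; simp
      rw [hfirst, hcount, hlast, hlen]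
      have hsub : (a' + 1) + (b' + 1) - (a' + 1) = b' + 1 := by omega
      rw [hsub]
      exact heq
  · intro heq
    have := pvRunCount_append
      (List.replicate (PySem.List.count ws (PySem.List.pyGetD ws 0 ""))
        (PySem.List.pyGetD ws 0 ""))
      (List.replicate (ws.length - PySem.List.count ws (PySem.List.pyGetD ws 0 ""))
        (PySem.List.pyGetD ws (-1) ""))
    rw [← heq] at this
    have h1 := pvRunCount_replicate (PySem.List.count ws (PySem.List.pyGetD ws 0 ""))
      (PySem.List.pyGetD ws 0 "")
    have h2 := pvRunCount_replicate (ws.length - PySem.List.count ws (PySem.List.pyGetD ws 0 ""))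
      (PySem.List.pyGetD ws (-1) "")
    omega

-- ===== VERDICT =====
theorem is_weather_stable_spec : Claim_equal_is_weather_stable := by
  intro ws amd _
  unfold Spec_is_weather_stable is_weather_stable is_weather_stable_alt
  by_cases hnil : ws = []
  · simp [hnil]
  · simp only [hnil, if_false]
    have hc := pv_changes_eq ws hnil
    have hpos := pvRunCount_pos ws hnil
    have hiff := pvRunCount_iff_recon ws hnil
    by_cases h2 : count_weather_type_changes ws ≥ 2
    · simp only [h2, if_pos]
      have hn : ¬ pvRunCount ws ≤ 2 := by omega
      rw [hiff] at hn
      rw [PySem.List.count_eq] at hn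
      simp [hn]
    · have hruns : pvRunCount ws ≤ 2 := by omega
      have hle : count_weather_type_changes ws ≤ 1 := by omega
      simp only [h2, if_false]
      have hrecon := hiff.mp hruns
      rw [PySem.List.count_eq] at hrecon
      split
      · simp [← hrecon]
      · simp [hle, ← hrecon]
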